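-- pv_equiv track=rewrite | github.com/sharuk2k3/FS-Elite-2021-22 | Day-31/Day_31_P_2.py | Supply
-- ===== SOURCE A (Python) =====
-- import collections
-- import math
--
-- def Supply(r, routes, loc1, loc2, h):
--     order_deal = collections.defaultdict(lambda: math.inf)
--     order_deal[loc1] = 0
--     for _ in range(h + 1):
--         order_deal_ = order_deal.copy()
--         for a, b, c in routes:
--             if order_deal_[b] > order_deal[a] + c:
--                 order_deal_[b] = order_deal[a] + c
--         order_deal = order_deal_
--
--     return order_deal[loc2] if order_deal[loc2] != math.inf else -1
-- ===== SOURCE B (Python) =====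
-- import collections
-- import math
--
--
-- def Supply(r, routes, loc1, loc2, h):
--     # Top-down demand-driven memoized DP on the recurrence
--     #   f(0, v)   = 0 if v == loc1 else inf
--     #   f(k+1, v) = min(f(k, v), min over incoming edges (a, v, c) of f(k, a) + c),
--     # evaluated with an explicit post-order stack (expand / retire phases), so only
--     # the states backward-reachable from (loc2, h+1) are ever computed.
--     inc = {}
--     for a, b, c in routes:
--         inc.setdefault(b, []).append((a, c))
--     memo = {}
--     stack = [(loc2, h + 1, True)]
--     while stack:
--         v, k, expand = stack.pop()
--         if expand:
--             if (v, k) in memo: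
--                 continue
--             if k <= 0:
--                 memo[(v, k)] = 0 if v == loc1 else math.inf
--             else:
--                 stack.append((v, k, False))
--                 stack.append((v, k - 1, True))
--                 for a, c in inc.get(v, []):
--                     stack.append((a, k - 1, True))
--         else:
--             best = memo[(v, k - 1)]
--             for a, c in inc.get(v, []):
--                 d = memo[(a, k - 1)] + c
--                 if d < best:
--                     best = d
--             memo[(v, k)] = best
--     res = memo[(loc2, h + 1)]
--     return -1 if res == math.inf else res
-- ===== Notes on version B (the rewrite author's own statement) =====
-- stated objective: faster
-- what changed: Replaces A's h+1 synchronous relax-all-edges rounds over a defaultdict copy with a top-down memoized recursion on f(k,v)=min(f(k-1,v), min over incoming (a,v,c) of f(k-1,a)+c), evaluated demand-driven from (loc2,h+1) with an explicit expand/retire stack over a reverse-adjacency index, so only states backward-reachable from loc2 are computed.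
import Mathlib
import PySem

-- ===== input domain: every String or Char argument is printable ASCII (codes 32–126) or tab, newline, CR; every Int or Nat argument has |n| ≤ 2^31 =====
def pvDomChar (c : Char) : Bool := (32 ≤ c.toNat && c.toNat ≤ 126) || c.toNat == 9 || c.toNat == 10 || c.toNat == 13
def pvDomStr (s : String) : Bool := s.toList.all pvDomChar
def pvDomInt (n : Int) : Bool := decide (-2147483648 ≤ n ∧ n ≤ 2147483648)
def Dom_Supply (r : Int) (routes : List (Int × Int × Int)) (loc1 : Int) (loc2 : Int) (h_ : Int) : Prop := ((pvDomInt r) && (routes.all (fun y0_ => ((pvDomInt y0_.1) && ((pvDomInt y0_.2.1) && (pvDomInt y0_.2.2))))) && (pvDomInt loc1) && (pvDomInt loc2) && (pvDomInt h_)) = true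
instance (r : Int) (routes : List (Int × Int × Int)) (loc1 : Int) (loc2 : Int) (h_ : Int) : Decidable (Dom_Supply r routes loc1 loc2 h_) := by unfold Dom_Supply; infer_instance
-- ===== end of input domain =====

-- B replaces A's h+1 relax-all-edges rounds by a top-down memoized DP on f(k,v),
-- driven on demand from (loc2, h+1) with an explicit expand/retire stack over a
-- reverse-adjacency index, computing only backward-reachable states (objective: faster,
-- measured).

-- ===== PORT A =====
-- Python's math.inf distances are modelled as Option Int (none = inf); the
-- defaultdict's reads of missing keys (which insert inf) are value-invisible,
-- so the port reads with getD _ none, which yields the same distance.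
def pvOGt (x y : Option Int) : Bool :=
  match x, y with
  | _, none => false            -- rhs inf: 'd > inf' is False (also inf > inf)
  | none, some _ => true        -- inf > finite
  | some xv, some yv => decide (yv < xv)

-- one edge relaxation: if order_deal_[b] > order_deal[a] + c: order_deal_[b] = ...
def pvRelax (dOld dNew : PySem.Dict Int (Option Int)) (t : Int × Int × Int) : PySem.Dict Int (Option Int) :=
  let cand := (dOld.getD t.1 none).map (· + t.2.2)
  if pvOGt (dNew.getD t.2.1 none) cand then dNew.insert t.2.1 cand else dNew

def Supply (r : Int) (routes : List (Int × Int × Int)) (loc1 : Int) (loc2 : Int) (h_ : Int) : Int :=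
  let d0 : PySem.Dict Int (Option Int) := (PySem.Dict.empty).insert loc1 (some 0)
  -- for _ in range(h + 1): order_deal_ = copy; for a,b,c in routes: relax; swap
  let dK := (List.range (h_ + 1).toNat).foldl (fun d _ => routes.foldl (pvRelax d) d) d0
  match dK.getD loc2 none with
  | some x => x
  | none => -1

-- ===== PORT B =====
-- Stack entries (v, k, expand); Python's int level k is carried as a Nat
-- (Python reaches only k ≥ 0: the start level is h+1 clamped by the 'k <= 0'
-- base case, matching (h_+1).toNat).  memo values: Option Int, none = math.inf.
-- Python's memo[...] reads in the retire phase can never raise (the expand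
-- phase pushed every dependency above the retire entry; proved below via
-- pvCov); they are ported as getD _ none.

-- best-candidate step of the retire phase: d = memo[(a, k-1)] + c; if d < best: best = d
def pvStepB (memo : Std.HashMap (Int × Nat) (Option Int)) (k : Nat) (best : Option Int) (ac : Int × Int) : Option Int :=
  match memo.getD (ac.1, k) none with
  | none => best                                  -- inf + c is inf, never < best
  | some dv =>
    match best with
    | none => some (dv + ac.2)
    | some bv => if dv + ac.2 < bv then some (dv + ac.2) else best

-- termination weight of an expand entry at level k (m = an upper bound on in-degrees)
def pvW (m : Nat) : Nat → Nat
  | 0 => 2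
  | k + 1 => (m + 1) * pvW m k + 2

def pvPhi (m : Nat) (s : List (Int × Nat × Bool)) : Nat :=
  (s.map (fun e => if e.2.2 then pvW m e.2.1 else 1)).sum

theorem pvW_pos (m k : Nat) : 0 < pvW m k := by
  cases k <;> simp [pvW]

-- the reverse-adjacency dict built by B
theorem inc_getD (rs : List (Int × Int × Int)) (v : Int) :
    (rs.foldl (fun d t => d.modify t.2.1 [] (· ++ [(t.1, t.2.2)])) (PySem.Dict.empty : PySem.Dict Int (List (Int × Int)))).getD v []
      = (rs.filter (fun t => t.2.1 == v)).map (fun t => (t.1, t.2.2)) := by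
  have hm : rs.foldl (fun d t => d.modify t.2.1 [] (· ++ [(t.1, t.2.2)])) (PySem.Dict.empty : PySem.Dict Int (List (Int × Int)))
      = (rs.map (fun t => (t.2.1, (t.1, t.2.2)))).foldl (fun d p => d.modify p.1 [] (· ++ [p.2])) PySem.Dict.empty := by
    rw [List.foldl_map]
  rw [hm, PySem.Dict.getD_foldl_modify_append, PySem.Dict.getD_empty, List.filter_map, List.map_map]
  simp [Function.comp_def]

-- the while loop over the explicit stack
def pvLoopB (loc1 : Int) (inc : PySem.Dict Int (List (Int × Int))) (m : Nat)
    (hm : ∀ v, (inc.getD v []).length ≤ m) :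
    List (Int × Nat × Bool) → Std.HashMap (Int × Nat) (Option Int) → Std.HashMap (Int × Nat) (Option Int)
  | [], memo => memo
  | (v, k, true) :: rest, memo =>
    if (memo[(v, k)]?).isSome then pvLoopB loc1 inc m hm rest memo
    else
      match k with
      | 0 => pvLoopB loc1 inc m hm rest (memo.insert (v, 0) (if v = loc1 then some 0 else none))
      | k + 1 =>
        -- push retire, then (v,k), then the incoming tails; LIFO ⇒ reversed on the list head
        pvLoopB loc1 inc m hm
          (((inc.getD v []).map (fun ac => (ac.1, k, true))).reverse ++
            (v, k, true) :: (v, k + 1, false) :: rest) memo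
  | (v, k, false) :: rest, memo =>
    let best := (inc.getD v []).foldl (pvStepB memo (k - 1)) (memo.getD (v, k - 1) none)
    pvLoopB loc1 inc m hm rest (memo.insert (v, k) best)
  termination_by s _ => pvPhi m s
  decreasing_by
  · simp only [pvPhi, List.map_cons, List.sum_cons, if_true]
    have := pvW_pos m k; omega
  · simp only [pvPhi, List.map_cons, List.sum_cons, if_true]
    have := pvW_pos m 0; omega
  · simp only [pvPhi, List.map_append, List.map_cons, List.sum_cons, List.sum_append,
      List.map_reverse, List.sum_reverse, List.map_map, if_true, Bool.false_eq_true, if_false]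
    have hdeg := hm v
    have hsum : ((inc.getD v []).map ((fun e => if e.2.2 = true then pvW m e.2.1 else 1) ∘
        (fun ac => (ac.1, k, true)))).sum = (inc.getD v []).length * pvW m k := by
      induction inc.getD v [] with
      | nil => simp
      | cons a l ih => simp only [List.map_cons, List.sum_cons, List.length_cons, ih,
          Function.comp_apply, if_true, Nat.succ_mul]; omega
    rw [hsum]
    have h1 : (inc.getD v []).length * pvW m k ≤ m * pvW m k :=
      Nat.mul_le_mul_right _ hdeg
    have h2 : pvW m (k + 1) = (m + 1) * pvW m k + 2 := rfl
    have := pvW_pos m k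
    rw [h2]; nlinarith [h1]
  · simp only [pvPhi, List.map_cons, List.sum_cons, Bool.false_eq_true, if_false]
    omega

def Supply_alt (r : Int) (routes : List (Int × Int × Int)) (loc1 : Int) (loc2 : Int) (h_ : Int) : Int :=
  -- inc = {}; for a,b,c in routes: inc.setdefault(b, []).append((a, c))
  let inc : PySem.Dict Int (List (Int × Int)) :=
    routes.foldl (fun d t => d.modify t.2.1 [] (· ++ [(t.1, t.2.2)])) PySem.Dict.empty
  let fin := pvLoopB loc1 inc routes.length
    (fun v => by
      show ((routes.foldl (fun d t => d.modify t.2.1 [] (· ++ [(t.1, t.2.2)])) PySem.Dict.empty).getD v []).length ≤ routes.length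
      rw [inc_getD routes v, List.length_map]
      exact List.length_filter_le _ routes)
    [(loc2, (h_ + 1).toNat, true)] (∅ : Std.HashMap (Int × Nat) (Option Int))
  -- res = memo[(loc2, h+1)]; return -1 if res == math.inf else res
  match fin[(loc2, (h_ + 1).toNat)]? with
  | some (some x) => x
  | _ => -1

-- ===== PRECONDITION & SPEC =====
def Spec_Supply (r : Int) (routes : List (Int × Int × Int)) (loc1 : Int) (loc2 : Int) (h_ : Int) (out : Int) : Prop := out = Supply_alt r routes loc1 loc2 h_
instance (r : Int) (routes : List (Int × Int × Int)) (loc1 : Int) (loc2 : Int) (h_ : Int) (out : Int) : Decidable (Spec_Supply r routes loc1 loc2 h_ out) := by unfold Spec_Supply; infer_instance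

-- ===== CLAIM (what is proved, stated in full; the proofs are below) =====
def Claim_equal_Supply : Prop := ∀ (r : Int) (routes : List (Int × Int × Int)) (loc1 : Int) (loc2 : Int) (h_ : Int), Dom_Supply r routes loc1 loc2 h_ → Spec_Supply r routes loc1 loc2 h_ (Supply r routes loc1 loc2 h_)

-- ===== LEMMAS AND PROOFS =====

def pvMin (x y : Option Int) : Option Int := if pvOGt x y then y else x

-- the Bellman layer function both programs compute
def pvF (routes : List (Int × Int × Int)) (loc1 : Int) : Nat → Int → Option Int
  | 0, v => if v = loc1 then some 0 else none
  | k + 1, v =>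
    routes.foldl
      (fun best t => if t.2.1 = v then pvMin best ((pvF routes loc1 k t.1).map (· + t.2.2)) else best)
      (pvF routes loc1 k v)

-- ----- A's rounds compute pvF -----

theorem scatter_getD (dOld : PySem.Dict Int (Option Int)) (rs : List (Int × Int × Int))
    (dacc : PySem.Dict Int (Option Int)) (v : Int) :
    (rs.foldl (pvRelax dOld) dacc).getD v none =
      rs.foldl (fun best t => if t.2.1 = v then pvMin best ((dOld.getD t.1 none).map (· + t.2.2)) else best)
        (dacc.getD v none) := by
  induction rs generalizing dacc with
  | nil => rfl
  | cons t rest ih =>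
    simp only [List.foldl_cons]
    rw [ih]
    congr 1
    by_cases hg : pvOGt (dacc.getD t.2.1 none) ((dOld.getD t.1 none).map (· + t.2.2)) = true
    · simp only [pvRelax, hg, if_pos, pvMin, PySem.Dict.getD_insert]
      by_cases hv : t.2.1 = v
      · subst hv; simp [hg]
      · simp [hv, Ne.symm hv]
    · simp only [pvRelax, hg, if_neg, Bool.not_eq_true, pvMin]
      by_cases hv : t.2.1 = v
      · subst hv; simp [hg]
      · simp [hv]

theorem dict0_getD (loc1 v : Int) :
    ((PySem.Dict.empty : PySem.Dict Int (Option Int)).insert loc1 (some 0)).getD v none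
      = (if v = loc1 then some 0 else none) := by
  rw [PySem.Dict.getD_insert]
  split <;> simp [PySem.Dict.getD_empty]

theorem A_rounds (routes : List (Int × Int × Int)) (loc1 : Int) (n : Nat) (v : Int) :
    ((List.range n).foldl (fun d _ => routes.foldl (pvRelax d) d)
        ((PySem.Dict.empty : PySem.Dict Int (Option Int)).insert loc1 (some 0))).getD v none
      = pvF routes loc1 n v := by
  induction n generalizing v with
  | zero => simpa [pvF] using dict0_getD loc1 v
  | succ n ih =>
    rw [List.range_succ, List.foldl_append]
    simp only [List.foldl_cons, List.foldl_nil]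
    rw [scatter_getD]
    show _ = pvF routes loc1 (n+1) v
    unfold pvF
    rw [ih v]
    congr 1
    funext best t
    rw [ih t.1]

-- ----- B's stack loop computes pvF at every memoized key -----

theorem pvStepB_eq (memo : Std.HashMap (Int × Nat) (Option Int)) (k : Nat) (best : Option Int) (ac : Int × Int) :
    pvStepB memo k best ac = pvMin best ((memo.getD (ac.1, k) none).map (· + ac.2)) := by
  unfold pvStepB pvMin pvOGt
  rcases h : memo.getD (ac.1, k) none with _ | dv <;> rcases best with _ | bv <;> simp

-- the retire fold over the filtered incoming list equals pvF's fold over routes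
theorem foldl_filter_map' (g : Int → Option Int) (v : Int)
    (rs : List (Int × Int × Int)) (b0 : Option Int) :
    ((rs.filter (fun t => t.2.1 == v)).map (fun t => (t.1, t.2.2))).foldl
        (fun best ac => pvMin best ((g ac.1).map (· + ac.2))) b0
      = rs.foldl (fun best t => if t.2.1 = v then pvMin best ((g t.1).map (· + t.2.2)) else best) b0 := by
  induction rs generalizing b0 with
  | nil => rfl
  | cons t rest ih =>
    by_cases h : t.2.1 = v
    · simp only [List.filter_cons, h, beq_self_eq_true, if_pos, List.map_cons, List.foldl_cons, ih]
    · have hb : (t.2.1 == v) = false := by simp [h]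
      simp only [List.filter_cons, hb, Bool.false_eq_true, if_false, List.foldl_cons, if_neg h, ih]

-- the retire fold only reads the memo at its own dependency keys
theorem foldl_stepB_congr (memo : Std.HashMap (Int × Nat) (Option Int)) (k : Nat)
    (g : Int → Option Int) (L : List (Int × Int)) (b0 : Option Int)
    (h : ∀ ac ∈ L, memo.getD (ac.1, k) none = g ac.1) :
    L.foldl (pvStepB memo k) b0 = L.foldl (fun best ac => pvMin best ((g ac.1).map (· + ac.2))) b0 := by
  induction L generalizing b0 with
  | nil => rfl
  | cons ac rest ih =>
    simp only [List.foldl_cons, pvStepB_eq, h ac (List.mem_cons_self)]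
    exact ih _ (fun a ha => h a (List.mem_cons_of_mem _ ha))

-- dependency keys of a retire entry (v, k): level k-1 of v and of its in-neighbours
def pvDeps (inc : PySem.Dict Int (List (Int × Int))) (v : Int) (k : Nat) : List (Int × Nat) :=
  (v, k - 1) :: (inc.getD v []).map (fun ac => (ac.1, k - 1))

-- coverage invariant: every retire entry has level ≥ 1 and each of its
-- dependencies is memoized already or produced by an entry above it
def pvCov (inc : PySem.Dict Int (List (Int × Int))) (memo : Std.HashMap (Int × Nat) (Option Int))
    (pref : List (Int × Nat)) : List (Int × Nat × Bool) → Prop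
  | [] => True
  | (v, k, ph) :: rest =>
    (ph = false → 1 ≤ k ∧ ∀ d ∈ pvDeps inc v k, (memo[d]?).isSome ∨ d ∈ pref)
      ∧ pvCov inc memo (pref ++ [(v, k)]) rest

theorem pvCov_mono (inc : PySem.Dict Int (List (Int × Int)))
    (memo memo' : Std.HashMap (Int × Nat) (Option Int)) (pref pref' : List (Int × Nat))
    (s : List (Int × Nat × Bool))
    (hmm : ∀ d : Int × Nat, (memo[d]?).isSome → (memo'[d]?).isSome)
    (hp : ∀ d ∈ pref, d ∈ pref' ∨ (memo'[d]?).isSome)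
    (hc : pvCov inc memo pref s) : pvCov inc memo' pref' s := by
  induction s generalizing pref pref' with
  | nil => trivial
  | cons e rest ih =>
    obtain ⟨v, k, ph⟩ := e
    obtain ⟨h1, h2⟩ := hc
    refine ⟨fun hph => ⟨(h1 hph).1, fun d hd => ?_⟩, ih _ _ ?_ h2⟩
    · rcases (h1 hph).2 d hd with h | h
      · exact Or.inl (hmm d h)
      · rcases hp d h with h' | h'
        · exact Or.inr h'
        · exact Or.inl h'
    · intro d hd
      rcases List.mem_append.1 hd with h | h
      · rcases hp d h with h' | h'
        · exact Or.inl (List.mem_append.2 (Or.inl h'))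
        · exact Or.inr h'
      · exact Or.inl (List.mem_append.2 (Or.inr h))

-- a block of expand entries in front: shift their keys into the prefix
theorem pvCov_expands (inc : PySem.Dict Int (List (Int × Int)))
    (memo : Std.HashMap (Int × Nat) (Option Int)) (es : List (Int × Nat))
    (pref : List (Int × Nat)) (s : List (Int × Nat × Bool))
    (hc : pvCov inc memo (pref ++ es) s) :
    pvCov inc memo pref ((es.map (fun d => (d.1, d.2, true))) ++ s) := by
  induction es generalizing pref with
  | nil => simpa using hc
  | cons d rest ih =>
    refine ⟨fun h => by simp at h, ?_⟩
    exact ih _ (by simpa using hc)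

-- the memo invariant: every memoized value is the corresponding pvF value
def pvInv (routes : List (Int × Int × Int)) (loc1 : Int)
    (memo : Std.HashMap (Int × Nat) (Option Int)) : Prop :=
  ∀ v k x, memo[(v, k)]? = some x → x = pvF routes loc1 k v

theorem pvInv_insert (routes : List (Int × Int × Int)) (loc1 : Int)
    (memo : Std.HashMap (Int × Nat) (Option Int)) (v : Int) (k : Nat)
    (hI : pvInv routes loc1 memo) (hv : pvF routes loc1 k v = w) :
    pvInv routes loc1 (memo.insert (v, k) w) := by
  intro u j x hx
  rw [Std.HashMap.getElem?_insert] at hx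
  by_cases h : (v, k) = (u, j)
  · rw [if_pos (by simp [h])] at hx
    obtain ⟨rfl, rfl⟩ := Prod.mk.injEq .. ▸ h
    cases hx; exact hv.symm
  · rw [if_neg (by simp [h])] at hx
    exact hI u j x hx

-- main loop lemma, by the loop's own functional induction
theorem pvLoopB_main (routes : List (Int × Int × Int))
    (loc1 : Int) (inc : PySem.Dict Int (List (Int × Int))) (m : Nat)
    (hm : ∀ v, (inc.getD v []).length ≤ m)
    (hinc : ∀ v, inc.getD v [] = (routes.filter (fun t => t.2.1 == v)).map (fun t => (t.1, t.2.2)))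
    (s : List (Int × Nat × Bool)) (memo : Std.HashMap (Int × Nat) (Option Int)) :
    pvCov inc memo [] s → pvInv routes loc1 memo →
    pvInv routes loc1 (pvLoopB loc1 inc m hm s memo)
      ∧ (∀ d : Int × Nat, (memo[d]?).isSome → ((pvLoopB loc1 inc m hm s memo)[d]?).isSome)
      ∧ (∀ e ∈ s, (((pvLoopB loc1 inc m hm s memo)[(e.1, e.2.1)]?).isSome)) := by
  fun_induction pvLoopB loc1 inc m hm s memo with
  | case1 memo =>
    intro _ hI
    exact ⟨hI, fun d h => h, by simp⟩
  | case2 v k rest memo hmem ih =>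
    intro hc hI
    obtain ⟨IH1, IH2, IH3⟩ := ih
      (pvCov_mono inc memo memo [(v, k)] [] rest (fun d h => h)
        (fun d hd => by rcases List.mem_singleton.1 hd with rfl; exact Or.inr hmem) hc.2) hI
    refine ⟨IH1, IH2, fun e he => ?_⟩
    rcases List.mem_cons.1 he with rfl | he
    · exact IH2 _ hmem
    · exact IH3 e he
  | case3 v rest memo hmem ih =>
    intro hc hI
    have hmono : ∀ d : Int × Nat, (memo[d]?).isSome →
        ((memo.insert (v, 0) (if v = loc1 then some 0 else none))[d]?).isSome := by
      intro d hd
      rw [Std.HashMap.getElem?_insert]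
      split <;> simp_all
    have hself : ((memo.insert (v, 0) (if v = loc1 then some 0 else none))[((v : Int), (0 : Nat))]?).isSome := by
      rw [Std.HashMap.getElem?_insert_self]; simp
    obtain ⟨IH1, IH2, IH3⟩ := ih
      (pvCov_mono inc memo _ [(v, 0)] [] rest hmono
        (fun d hd => by rcases List.mem_singleton.1 hd with rfl; exact Or.inr hself) hc.2)
      (pvInv_insert routes loc1 memo v 0 hI (by simp [pvF]))
    refine ⟨IH1, fun d hd => IH2 d (hmono d hd), fun e he => ?_⟩
    rcases List.mem_cons.1 he with rfl | he
    · exact IH2 _ hself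
    · exact IH3 e he
  | case4 v rest memo k hmem ih =>
    intro hc hI
    have hstack : ((inc.getD v []).map (fun ac => (ac.1, k, true))).reverse
        = (((inc.getD v []).map (fun ac => (ac.1, k))).reverse).map
            (fun d : Int × Nat => (d.1, d.2, true)) := by
      simp [List.map_reverse, List.map_map, Function.comp_def]
    have hcov : pvCov inc memo []
        (((inc.getD v []).map (fun ac => (ac.1, k, true))).reverse ++
          (v, k, true) :: (v, k + 1, false) :: rest) := by
      rw [hstack]
      apply pvCov_expands
      refine ⟨fun h => by simp at h, ?_, ?_⟩
      · intro hph
        refine ⟨Nat.le_add_left 1 k, fun d hd => ?_⟩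
        rcases List.mem_cons.1 hd with rfl | hd
        · exact Or.inr (by simp)
        · refine Or.inr ?_
          simp only [Nat.add_sub_cancel] at hd
          simp only [List.nil_append, List.mem_append, List.mem_reverse]
          exact Or.inl hd
      · refine pvCov_mono inc memo memo [(v, k + 1)] _ rest (fun d h => h) ?_ hc.2
        intro d hd
        rcases List.mem_singleton.1 hd with rfl
        refine Or.inl (by simp)
    obtain ⟨IH1, IH2, IH3⟩ := ih hcov hI
    refine ⟨IH1, IH2, fun e he => ?_⟩
    rcases List.mem_cons.1 he with rfl | he
    · exact IH3 (v, k + 1, false) (by simp)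
    · exact IH3 e (by simp [he])
  | case5 v k rest memo best ih =>
    intro hc hI
    obtain ⟨hk, hdeps⟩ := hc.1 rfl
    obtain ⟨j, rfl⟩ : ∃ j, k = j + 1 := ⟨k - 1, by omega⟩
    have hdep : ∀ d ∈ pvDeps inc v (j + 1), (memo[d]?).isSome := by
      intro d hd
      rcases hdeps d hd with h | h
      · exact h
      · simp at h
    have hgetD : ∀ d ∈ pvDeps inc v (j + 1), memo.getD d none = pvF routes loc1 d.2 d.1 := by
      intro d hd
      have hs := hdep d hd
      rcases ho : memo[d]? with _ | x
      · rw [ho] at hs; simp at hs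
      · rw [Std.HashMap.getD_eq_getD_getElem?, ho]
        exact hI d.1 d.2 x (by rw [← ho])
    have hbase : memo.getD (v, j) none = pvF routes loc1 j v := by
      have := hgetD (v, j) (by simp [pvDeps])
      simpa using this
    have hstep : ∀ ac ∈ inc.getD v [], memo.getD (ac.1, j) none = pvF routes loc1 j ac.1 := by
      intro ac hac
      have := hgetD (ac.1, j) (by
        simp only [pvDeps, Nat.add_sub_cancel, List.mem_cons]
        exact Or.inr (List.mem_map.2 ⟨ac, hac, rfl⟩))
      simpa using this
    have hbest : best = pvF routes loc1 (j + 1) v := by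
      show (inc.getD v []).foldl (pvStepB memo (j + 1 - 1)) (memo.getD (v, j + 1 - 1) none) = _
      simp only [Nat.add_sub_cancel]
      rw [hbase, foldl_stepB_congr memo j (pvF routes loc1 j) _ _ hstep, hinc v,
        foldl_filter_map']
      rfl
    have hmono : ∀ d : Int × Nat, (memo[d]?).isSome → ((memo.insert (v, j + 1) best)[d]?).isSome := by
      intro d hd
      rw [Std.HashMap.getElem?_insert]
      split <;> simp_all
    have hself : ((memo.insert (v, j + 1) best)[((v : Int), j + 1)]?).isSome := by
      rw [Std.HashMap.getElem?_insert_self]; simp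
    obtain ⟨IH1, IH2, IH3⟩ := ih
      (pvCov_mono inc memo _ [(v, j + 1)] [] rest hmono
        (fun d hd => by rcases List.mem_singleton.1 hd with rfl; exact Or.inr hself) hc.2)
      (pvInv_insert routes loc1 memo v (j + 1) hI hbest.symm)
    refine ⟨IH1, fun d hd => IH2 d (hmono d hd), fun e he => ?_⟩
    rcases List.mem_cons.1 he with rfl | he
    · exact IH2 _ hself
    · exact IH3 e he

-- final answer of B
theorem B_eq_pvF (routes : List (Int × Int × Int)) (loc1 loc2 : Int) (n : Nat)
    (inc : PySem.Dict Int (List (Int × Int))) (m : Nat)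
    (hm : ∀ v, (inc.getD v []).length ≤ m)
    (hinc : ∀ v, inc.getD v [] = (routes.filter (fun t => t.2.1 == v)).map (fun t => (t.1, t.2.2))) :
    (pvLoopB loc1 inc m hm [(loc2, n, true)] (∅ : Std.HashMap (Int × Nat) (Option Int)))[((loc2 : Int), n)]?
      = some (pvF routes loc1 n loc2) := by
  obtain ⟨hI, _, hmem⟩ := pvLoopB_main routes loc1 inc m hm hinc [(loc2, n, true)] (∅ : Std.HashMap (Int × Nat) (Option Int))
    ⟨fun h => by simp at h, trivial⟩
    (by intro v k x hx; rw [Std.HashMap.getElem?_empty] at hx; cases hx)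
  have h1 := hmem (loc2, n, true) (List.mem_cons_self)
  rcases ho : (pvLoopB loc1 inc m hm [(loc2, n, true)] (∅ : Std.HashMap (Int × Nat) (Option Int)))[((loc2 : Int), n)]? with _ | x
  · rw [ho] at h1; simp at h1
  · rw [hI loc2 n x ho]

theorem Supply_eq_alt (r : Int) (routes : List (Int × Int × Int)) (loc1 loc2 h_ : Int) :
    Supply r routes loc1 loc2 h_ = Supply_alt r routes loc1 loc2 h_ := by
  simp only [Supply, Supply_alt]
  rw [A_rounds routes loc1 ((h_ + 1).toNat) loc2,
    B_eq_pvF routes loc1 loc2 ((h_ + 1).toNat) _ routes.length _ (fun v => inc_getD routes v)]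
  cases pvF routes loc1 ((h_ + 1).toNat) loc2 <;> rfl

-- ===== VERDICT (by name: the statement is the Claim_ definition above) =====
theorem Supply_spec : Claim_equal_Supply := by
  intro r routes loc1 loc2 h_ _
  unfold Spec_Supply
  exact Supply_eq_alt r routes loc1 loc2 h_
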